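-- pv_equiv track=rewrite | github.com/jpssoares/CodeWorkspaces | PythonWorkspace/Hackerrank/hackerrank_fail_minion_game/hackerrank_minion_game.py | letters_list
-- ===== SOURCE A (Python) =====
-- vowels_list = ["a", "e", "i", "o", "u", "A", "E", "I", "O", "U"]
--
-- def letters_list(string):
--     cons = []
--     vowels = []
--     for l in string:
--         if(l in vowels_list):
--             if (l not in vowels):
--                 vowels.append(l)
--         else:
--             if (l not in cons):
--                 cons.append(l)
--     return(cons, vowels)
-- ===== SOURCE B (Python) =====
-- vowels_list = ["a", "e", "i", "o", "u", "A", "E", "I", "O", "U"]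
--
-- def letters_list(string):
--     # Deduplicate first (first-occurrence order), then partition by vowel-ness.
--     distinct = list(dict.fromkeys(string))
--     cons = [c for c in distinct if c not in vowels_list]
--     vowels = [c for c in distinct if c in vowels_list]
--     return (cons, vowels)
-- ===== Notes on version B (the rewrite author's own statement) =====
-- stated objective: simpler
-- what changed: Replaces the single interleaved loop that maintains two growing lists with per-character membership scans by one hash-based dict.fromkeys deduplication pass followed by two partition comprehensions over the (at most 95) distinct characters.
import Mathlib
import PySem

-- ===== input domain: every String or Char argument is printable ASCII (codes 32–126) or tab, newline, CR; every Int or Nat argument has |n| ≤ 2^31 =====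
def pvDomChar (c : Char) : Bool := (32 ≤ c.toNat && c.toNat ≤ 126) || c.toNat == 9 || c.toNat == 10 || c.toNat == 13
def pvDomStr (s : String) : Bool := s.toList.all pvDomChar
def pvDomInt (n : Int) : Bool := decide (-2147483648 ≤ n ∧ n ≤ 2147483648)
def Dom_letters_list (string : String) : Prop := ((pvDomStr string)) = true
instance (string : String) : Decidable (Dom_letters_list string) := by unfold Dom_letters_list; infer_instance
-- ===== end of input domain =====

-- B replaces A's interleaved dedup/classify loop by dict.fromkeys deduplication then two partition filters (objective: simpler).

-- ===== PORT A =====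
def vowelsList : List String := ["a", "e", "i", "o", "u", "A", "E", "I", "O", "U"]

-- A's for-loop over the string's characters (each Python char is a 1-char str)
def lettersLoopA : List String → List String → List String → List String × List String
  | [], cons, vow => (cons, vow)
  | l :: rest, cons, vow =>
    if l ∈ vowelsList then
      if l ∈ vow then lettersLoopA rest cons vow
      else lettersLoopA rest cons (vow ++ [l])
    else
      if l ∈ cons then lettersLoopA rest cons vow
      else lettersLoopA rest (cons ++ [l]) vow

def letters_list (string : String) : List String × List String :=
  lettersLoopA (string.toList.map (fun c => String.mk [c])) [] []

-- ===== PORT B =====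
def letters_list_alt (string : String) : List String × List String :=
  let distinct := PySem.List.dedup (string.toList.map (fun c => String.mk [c]))
  (distinct.filter (fun c => decide (c ∉ vowelsList)),
   distinct.filter (fun c => decide (c ∈ vowelsList)))

-- ===== PRECONDITION & SPEC =====
def Spec_letters_list (string : String) (out : List String × List String) : Prop := out = letters_list_alt string
instance (string : String) (out : List String × List String) : Decidable (Spec_letters_list string out) := by unfold Spec_letters_list; infer_instance

-- ===== CLAIM (what is proved, stated in full; the proofs are below) =====
def Claim_equal_letters_list : Prop := ∀ (string : String), Dom_letters_list string → Spec_letters_list string (letters_list string)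

-- ===== LEMMAS AND PROOFS =====

-- dedup with an external "already seen" accumulator
def dedupFrom (seen : List String) : List String → List String
  | [] => []
  | l :: rest => if l ∈ seen then dedupFrom seen rest else l :: dedupFrom (l :: seen) rest

theorem dedupFrom_congr (l : List String) : ∀ (s1 s2 : List String),
    (∀ x, x ∈ s1 ↔ x ∈ s2) → dedupFrom s1 l = dedupFrom s2 l := by
  induction l with
  | nil => intro _ _ _; rfl
  | cons a t ih =>
    intro s1 s2 h
    by_cases hm : a ∈ s2
    · simp [dedupFrom, hm, (h a).mpr hm, ih _ _ h]
    · have hm1 : a ∉ s1 := fun hx => hm ((h a).mp hx)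
      simp only [dedupFrom, if_neg hm, if_neg hm1]
      exact congrArg _ (ih (a :: s1) (a :: s2) (fun x => by simp [h x]))

theorem foldl_add_eq_dedupFrom (l : List String) : ∀ (seen : List String),
    l.foldl PySem.Set.add seen = seen ++ dedupFrom seen l := by
  induction l with
  | nil => intro seen; simp [dedupFrom]
  | cons a t ih =>
    intro seen
    simp only [List.foldl_cons, dedupFrom, PySem.Set.add, PySem.Set.contains]
    by_cases hm : a ∈ seen
    · simp [hm, ih]
    · simp [hm, ih, List.append_assoc, dedupFrom_congr t (seen ++ [a]) (a :: seen)
        (fun x => by simp; tauto)]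

theorem dedup_eq_dedupFrom (l : List String) : PySem.List.dedup l = dedupFrom [] l := by
  rw [PySem.List.dedup_eq_ofList, PySem.Set.ofList_eq_foldl]
  simpa using foldl_add_eq_dedupFrom l []

theorem lettersLoopA_eq (l : List String) : ∀ (cons vow : List String),
    (∀ x ∈ cons, x ∉ vowelsList) →
    (∀ x ∈ vow, x ∈ vowelsList) →
    lettersLoopA l cons vow =
      (cons ++ (dedupFrom (cons ++ vow) l).filter (fun c => decide (c ∉ vowelsList)),
       vow ++ (dedupFrom (cons ++ vow) l).filter (fun c => decide (c ∈ vowelsList))) := by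
  induction l with
  | nil => intro cons vow _ _; simp [lettersLoopA, dedupFrom]
  | cons a t ih =>
    intro cons vow hc hv
    by_cases hva : a ∈ vowelsList
    · have hnc : a ∉ cons := fun hx => hc a hx hva
      by_cases hmem : a ∈ vow
      · have hseen : a ∈ cons ++ vow := List.mem_append.mpr (Or.inr hmem)
        simp only [lettersLoopA, if_pos hva, if_pos hmem, dedupFrom, if_pos hseen]
        exact ih cons vow hc hv
      · have hseen : a ∉ cons ++ vow := by simp [hnc, hmem]
        have hv' : ∀ x ∈ vow ++ [a], x ∈ vowelsList := by
          intro x hx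
          rcases List.mem_append.mp hx with h | h
          · exact hv x h
          · simp at h; subst h; exact hva
        simp only [lettersLoopA, if_pos hva, if_neg hmem, dedupFrom, if_neg hseen]
        rw [ih cons (vow ++ [a]) hc hv',
            dedupFrom_congr t (cons ++ (vow ++ [a])) (a :: (cons ++ vow))
              (fun x => by simp; tauto)]
        simp [hva, List.append_assoc]
    · have hnv : a ∉ vow := fun hx => hva (hv a hx)
      by_cases hmem : a ∈ cons
      · have hseen : a ∈ cons ++ vow := List.mem_append.mpr (Or.inl hmem)
        simp only [lettersLoopA, if_neg hva, if_pos hmem, dedupFrom, if_pos hseen]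
        exact ih cons vow hc hv
      · have hseen : a ∉ cons ++ vow := by simp [hmem, hnv]
        have hc' : ∀ x ∈ cons ++ [a], x ∉ vowelsList := by
          intro x hx
          rcases List.mem_append.mp hx with h | h
          · exact hc x h
          · simp at h; subst h; exact hva
        simp only [lettersLoopA, if_neg hva, if_neg hmem, dedupFrom, if_neg hseen]
        rw [ih (cons ++ [a]) vow hc' hv,
            dedupFrom_congr t ((cons ++ [a]) ++ vow) (a :: (cons ++ vow))
              (fun x => by simp; tauto)]
        simp [hva, List.append_assoc]

-- ===== VERDICT (by name: the statement is the Claim_ definition above) =====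
theorem letters_list_spec : Claim_equal_letters_list := by
  intro string _
  show letters_list string = letters_list_alt string
  unfold letters_list letters_list_alt
  rw [lettersLoopA_eq _ [] [] (by simp) (by simp), dedup_eq_dedupFrom]
  simp
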